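-- pv_equiv track=rewrite | github.com/arlenk/qmk_firmware | keyboards/ergodox_ez/util/prettify_ez_configurator_code.py | _group_layer_definitions
-- ===== SOURCE A (Python) =====
-- def _group_layer_definitions(lines):
--     """
--     Group (potentially) multi line layer definitions into one line per defition
--
--     :param lines: List[str]
--         lines of layer definition source code (from extract_layer_definitions)
--
--     :return: List[str]
--         one line per layer
--
--     """
--     layers = []
--
--     # each layer is defined with a line (or multiple lines) like
--     #   '[MDIA] = LAYOUT_ergodox(',
--     #      ...
--     #    'KC_TRNS, KC_TRNS, KC_WBAK',
--     #    '),'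
--     #
--     # we'll split based on layer names (ie, the [MDIA] above)
--     # since layer definitions have commas in them, we can't use ending comma
--     # to find eny of each layer so we'll just keep going till the next
--     # layer name (or till we reach the end of lines)
--     definition = []
--     for iline, line in enumerate(lines):
--         line = line.strip()
--         if line.startswith("["):
--             # found start of a layer definition.. if we were already
--             # in an existing layer definition, append to knwon layers
--             # and start over
--             if len(definition):
--                 layers.append(definition)
--                 definition = []
--
--         definition.append(line)
--
--     # make sure to catch last layer definition
--     if len(definition):
--         layers.append(definition)
--
--     layers = ["".join(definition) for definition in layers]
--
--     return layers
-- ===== SOURCE B (Python) =====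
-- def _group_layer_definitions(lines):
--     # Staged approach: strip everything first, then cut the list at each
--     # line starting with "[" by scanning forward with an index to the next
--     # marker and joining the slice between cut points.
--     stripped = [line.strip() for line in lines]
--     n = len(stripped)
--     layers = []
--     i = 0
--     while i < n:
--         j = i + 1
--         while j < n and not stripped[j].startswith("["):
--             j += 1
--         layers.append("".join(stripped[i:j]))
--         i = j
--     return layers
-- ===== Notes on version B (the rewrite author's own statement) =====
-- stated objective: alternative
-- what changed: Replaces A's single forward fold with a flush-on-marker accumulator and a trailing flush by a staged version: strip all lines first, then cut the stripped list at each '['-line by scanning an index to the next marker and joining each slice, so no open-group accumulator or post-loop flush exists.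
import Mathlib
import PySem

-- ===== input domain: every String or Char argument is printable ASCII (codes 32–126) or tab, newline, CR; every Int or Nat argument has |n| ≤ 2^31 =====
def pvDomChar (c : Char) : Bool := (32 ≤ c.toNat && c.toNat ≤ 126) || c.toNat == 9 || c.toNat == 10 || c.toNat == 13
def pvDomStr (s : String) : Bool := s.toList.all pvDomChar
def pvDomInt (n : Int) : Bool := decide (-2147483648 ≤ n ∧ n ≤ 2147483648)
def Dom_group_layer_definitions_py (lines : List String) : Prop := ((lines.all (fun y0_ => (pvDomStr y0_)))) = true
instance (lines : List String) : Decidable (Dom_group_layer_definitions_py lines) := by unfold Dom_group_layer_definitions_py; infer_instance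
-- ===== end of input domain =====

-- B stages the work: strip all lines first, then cut the stripped list at each
-- "["-line and join the slices (objective: alternative decomposition, same cost).

-- ===== PORT A =====
-- loop body of A: strip, flush the open definition at a "["-line, append the line
def pvStepA (acc : List (List String) × List String) (line : String) :
    List (List String) × List String :=
  let line := PySem.Str.strip line
  let acc :=
    if PySem.Str.startswith line "[" then
      if acc.2.length ≠ 0 then (acc.1 ++ [acc.2], ([] : List String)) else acc
    else acc
  (acc.1, acc.2 ++ [line])

def group_layer_definitions_py (lines : List String) : List String :=
  let st := lines.foldl pvStepA ([], [])
  let layers := if st.2.length ≠ 0 then st.1 ++ [st.2] else st.1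
  layers.map (fun definition => PySem.Str.join "" definition)

-- ===== PORT B =====
-- Source B's index scan "advance j to the next marker, emit stripped[i:j], set i := j"
-- transcribed on the remaining suffix: the slice is the head plus the run of
-- non-marker lines (takeWhile), and the loop continues from the next marker (dropWhile).
def pvCut (stripped : List String) : List String :=
  match stripped with
  | [] => []
  | h :: t =>
    PySem.Str.join "" (h :: t.takeWhile (fun s => !(PySem.Str.startswith s "["))) ::
      pvCut (t.dropWhile (fun s => !(PySem.Str.startswith s "[")))
termination_by stripped.length
decreasing_by
  exact Nat.lt_succ_of_le (t.length_dropWhile_le _)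

def group_layer_definitions_py_alt (lines : List String) : List String :=
  pvCut (lines.map PySem.Str.strip)

-- ===== PRECONDITION & SPEC =====
def Spec_group_layer_definitions_py (lines : List String) (out : List String) : Prop := out = group_layer_definitions_py_alt lines
instance (lines : List String) (out : List String) : Decidable (Spec_group_layer_definitions_py lines out) := by unfold Spec_group_layer_definitions_py; infer_instance

-- ===== CLAIM (what is proved, stated in full; the proofs are below) =====
def Claim_equal_group_layer_definitions_py : Prop := ∀ (lines : List String), Dom_group_layer_definitions_py lines → Spec_group_layer_definitions_py lines (group_layer_definitions_py lines)

-- ===== LEMMAS AND PROOFS =====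

-- Invariant: A's fold from an open, nonempty definition `defn` produces `layers`,
-- then `defn` extended by the run of non-marker lines, then B's cuts of the rest.
theorem pvMain : ∀ (xs : List String) (layers : List (List String)) (defn : List String),
    defn ≠ [] →
    ((if (xs.foldl pvStepA (layers, defn)).2.length ≠ 0 then
        (xs.foldl pvStepA (layers, defn)).1 ++ [(xs.foldl pvStepA (layers, defn)).2]
      else (xs.foldl pvStepA (layers, defn)).1).map
        (fun d => PySem.Str.join "" d))
    = layers.map (fun d => PySem.Str.join "" d) ++
      [PySem.Str.join "" (defn ++
        (xs.map PySem.Str.strip).takeWhile (fun s => !(PySem.Str.startswith s "[")))] ++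
      pvCut ((xs.map PySem.Str.strip).dropWhile (fun s => !(PySem.Str.startswith s "["))) := by
  intro xs
  induction xs with
  | nil =>
    intro layers defn hd
    simp [List.length_eq_zero_iff, hd, pvCut]
  | cons x rest ih =>
    intro layers defn hd
    rw [List.foldl_cons]
    by_cases h : PySem.Str.startswith (PySem.Str.strip x) "[" = true
    · have h' : PySem.Chars.startswith (PySem.Chars.strip x.toList) ['['] = true := by
        simpa using h
      have hA : pvStepA (layers, defn) x = (layers ++ [defn], [PySem.Str.strip x]) := by
        simp [pvStepA, h', List.length_eq_zero_iff, hd]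
      rw [hA, ih _ _ (by simp)]
      rw [List.map_cons, List.takeWhile_cons, List.dropWhile_cons]
      simp only [h]
      conv_rhs => rw [pvCut.eq_def]
      simp
    · have h' : ¬ PySem.Chars.startswith (PySem.Chars.strip x.toList) ['['] = true := by
        simpa using h
      have hA : pvStepA (layers, defn) x = (layers, defn ++ [PySem.Str.strip x]) := by
        simp [pvStepA, h']
      rw [hA, ih _ _ (by simp)]
      rw [List.map_cons, List.takeWhile_cons, List.dropWhile_cons]
      simp only [h]
      simp

-- ===== VERDICT (by name: the statement is the Claim_ definition above) =====
theorem group_layer_definitions_py_spec : Claim_equal_group_layer_definitions_py := by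
  intro lines _
  show group_layer_definitions_py lines = group_layer_definitions_py_alt lines
  cases lines with
  | nil => simp [group_layer_definitions_py, group_layer_definitions_py_alt, pvCut]
  | cons l rest =>
    unfold group_layer_definitions_py group_layer_definitions_py_alt
    rw [List.foldl_cons]
    have hA : pvStepA ([], []) l = ([], [PySem.Str.strip l]) := by
      by_cases h : PySem.Chars.startswith (PySem.Chars.strip l.toList) ['['] = true <;>
        simp [pvStepA, h]
    rw [hA]
    have := pvMain rest [] [PySem.Str.strip l] (by simp)
    simp only [List.map_nil, List.nil_append] at this
    rw [this, List.map_cons]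
    conv_rhs => rw [pvCut.eq_def]
    simp
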